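-- pv_equiv track=rewrite | github.com/ath32/ASCs | 0_Python_scripts/3.3_Get_ASC_relative_codon_usage.py | get_primary_lists
-- ===== SOURCE A (Python) =====
-- def get_primary_lists(chunks):
--
--     taa = []
--     tga = []
--     tag = []
--
--     #Access UTR + primary stop
--     for i in chunks:
--         j = i.split('\n')
--         utr = j[1]
--         pri = utr[0:3]
--
--     #Create list for each primary codon
--         if pri == 'taa':
--             taa.append(utr)
--         elif pri == 'tga':
--             tga.append(utr)
--         elif pri == 'tag':
--             tag.append(utr)
--
--     return taa, tga, tag
-- ===== SOURCE B (Python) =====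
-- def get_primary_lists(chunks):
--     utrs = [c.split('\n')[1] for c in chunks]
--     taa = [u for u in utrs if u[0:3] == 'taa']
--     tga = [u for u in utrs if u[0:3] == 'tga']
--     tag = [u for u in utrs if u[0:3] == 'tag']
--     return taa, tga, tag
-- ===== Notes on version B (the rewrite author's own statement) =====
-- stated objective: simpler
-- what changed: Replaces the single branching accumulation loop with a map extracting the UTRs followed by three independent filtering comprehensions, one per stop codon.
import Mathlib
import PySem

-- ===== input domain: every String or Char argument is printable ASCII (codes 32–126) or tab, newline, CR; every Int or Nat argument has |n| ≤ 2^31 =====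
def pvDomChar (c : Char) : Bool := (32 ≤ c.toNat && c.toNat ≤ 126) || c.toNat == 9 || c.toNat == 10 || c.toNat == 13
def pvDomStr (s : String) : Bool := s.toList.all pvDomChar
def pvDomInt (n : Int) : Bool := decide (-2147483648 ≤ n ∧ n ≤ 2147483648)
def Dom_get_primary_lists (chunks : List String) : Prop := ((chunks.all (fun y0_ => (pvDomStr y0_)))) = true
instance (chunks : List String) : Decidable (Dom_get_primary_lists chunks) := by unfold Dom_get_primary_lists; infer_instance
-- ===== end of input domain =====

-- B replaces A's single branching accumulation loop by a map extracting the UTRs plus three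
-- independent filters (one per stop codon); same return value, no speed claim.

-- ===== PORT A =====
def get_primary_lists (chunks : List String) : List String × List String × List String :=
  let r := chunks.foldl
    (fun (acc : List String × List String × List String) i =>
      let j := ((PySem.Str.split? i "\n").getD [])
      let utr := (PySem.List.pyGet? j 1).getD ""   -- j[1]; Pre_ guarantees the index is in range
      let pri := PySem.Str.slice utr (some 0) (some 3)
      if pri = "taa" then (acc.1 ++ [utr], acc.2.1, acc.2.2)
      else if pri = "tga" then (acc.1, acc.2.1 ++ [utr], acc.2.2)
      else if pri = "tag" then (acc.1, acc.2.1, acc.2.2 ++ [utr])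
      else acc)
    ([], [], [])
  r

-- ===== PORT B =====
def pvUtr (c : String) : String :=
  (PySem.List.pyGet? (((PySem.Str.split? c "\n").getD [])) 1).getD ""   -- c.split('\n')[1]; in range under Pre_

def get_primary_lists_alt (chunks : List String) : List String × List String × List String :=
  let utrs := chunks.map pvUtr
  ( utrs.filter (fun u => PySem.Str.slice u (some 0) (some 3) = "taa")
  , utrs.filter (fun u => PySem.Str.slice u (some 0) (some 3) = "tga")
  , utrs.filter (fun u => PySem.Str.slice u (some 0) (some 3) = "tag") )

-- ===== PRECONDITION & SPEC =====
-- Pre_ excludes chunks lacking a second line, where A (and B) raise IndexError on j[1].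
def Pre_get_primary_lists (chunks : List String) : Prop :=
  ∀ c ∈ chunks, 2 ≤ (((PySem.Str.split? c "\n").getD [])).length
instance (chunks : List String) : Decidable (Pre_get_primary_lists chunks) := by
  unfold Pre_get_primary_lists; infer_instance
def pvWitness_get_primary_lists : List String := ["g1\ntaaxx", "g2\ntgayy", "g3\nccc"]

def Spec_get_primary_lists (chunks : List String) (out : List String × List String × List String) : Prop := out = get_primary_lists_alt chunks
instance (chunks : List String) (out : List String × List String × List String) : Decidable (Spec_get_primary_lists chunks out) := by unfold Spec_get_primary_lists; infer_instance

-- ===== CLAIM (what is proved, stated in full; the proofs are below) =====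
def Claim_equal_get_primary_lists : Prop := ∀ (chunks : List String), Dom_get_primary_lists chunks → Pre_get_primary_lists chunks → Spec_get_primary_lists chunks (get_primary_lists chunks)

-- ===== LEMMAS AND PROOFS =====

-- Loop invariant: folding A's step from any accumulator appends the three filtered lists.
theorem pv_fold_eq (chunks : List String) :
    ∀ acc : List String × List String × List String,
    chunks.foldl
      (fun (acc : List String × List String × List String) i =>
        let j := ((PySem.Str.split? i "\n").getD [])
        let utr := (PySem.List.pyGet? j 1).getD ""
        let pri := PySem.Str.slice utr (some 0) (some 3)
        if pri = "taa" then (acc.1 ++ [utr], acc.2.1, acc.2.2)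
        else if pri = "tga" then (acc.1, acc.2.1 ++ [utr], acc.2.2)
        else if pri = "tag" then (acc.1, acc.2.1, acc.2.2 ++ [utr])
        else acc)
      acc
    = ( acc.1 ++ (chunks.map pvUtr).filter (fun u => PySem.Str.slice u (some 0) (some 3) = "taa")
      , acc.2.1 ++ (chunks.map pvUtr).filter (fun u => PySem.Str.slice u (some 0) (some 3) = "tga")
      , acc.2.2 ++ (chunks.map pvUtr).filter (fun u => PySem.Str.slice u (some 0) (some 3) = "tag") ) := by
  induction chunks with
  | nil => intro acc; simp
  | cons c cs ih =>
    intro acc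
    simp only [List.foldl_cons, List.map_cons, List.filter_cons]
    rw [ih]
    simp only [show (PySem.List.pyGet? ((PySem.Str.split? c "\n").getD []) 1).getD "" = pvUtr c from rfl]
    by_cases h1 : PySem.Str.slice (pvUtr c) (some 0) (some 3) = "taa"
    · simp [h1]
    · by_cases h2 : PySem.Str.slice (pvUtr c) (some 0) (some 3) = "tga"
      · simp [h2]
      · by_cases h3 : PySem.Str.slice (pvUtr c) (some 0) (some 3) = "tag"
        · simp [h3]
        · simp [h1, h2, h3]

-- ===== VERDICT (by name: the statement is the Claim_ definition above) =====
theorem get_primary_lists_spec : Claim_equal_get_primary_lists := by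
  intro chunks _ _
  unfold Spec_get_primary_lists get_primary_lists get_primary_lists_alt
  rw [pv_fold_eq chunks ([], [], [])]
  simp
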